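-- pv_equiv track=rewrite | github.com/Sergshaman/Tinnitus-Search | tinnitus_search/mcp_server.py | _diversify_by_file
-- ===== SOURCE A (Python) =====
-- from typing import Any, Dict, List, Optional
--
-- def _diversify_by_file(sorted_hits: List[Dict[str, Any]], limit: int, max_per_file: int) -> List[Dict[str, Any]]:
--     buckets: Dict[str, List[Dict[str, Any]]] = {}
--     for h in sorted_hits:
--         fp = h.get("file_path") or ""
--         buckets.setdefault(fp, [])
--         if len(buckets[fp]) < max_per_file:
--             buckets[fp].append(h)
--
--     out: List[Dict[str, Any]] = []
--     round_i = 0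
--     while len(out) < limit:
--         progressed = False
--         for fp, lst in buckets.items():
--             if round_i < len(lst):
--                 out.append(lst[round_i])
--                 progressed = True
--                 if len(out) >= limit:
--                     break
--         if not progressed:
--             break
--         round_i += 1
--     return out
-- ===== SOURCE B (Python) =====
-- from typing import Any, Dict, List
--
--
-- def _diversify_by_file(sorted_hits: List[Dict[str, Any]], limit: int, max_per_file: int) -> List[Dict[str, Any]]:
--     # Assign each kept hit a scalar schedule index (copy_rank * num_files + file_rank)
--     # and obtain the round-robin order by a single sort on that index: no round loop at all.
--     order: Dict[str, int] = {}   # file -> first-seen rank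
--     seen: Dict[str, int] = {}    # file -> occurrences so far
--     kept = []                    # (file, copy_rank, hit)
--     for h in sorted_hits:
--         fp = h.get("file_path") or ""
--         if fp not in order:
--             order[fp] = len(order)
--         j = seen.get(fp, 0)
--         seen[fp] = j + 1
--         if j < max_per_file:
--             kept.append((fp, j, h))
--     if limit <= 0:
--         return []
--     nfiles = len(order)
--     kept.sort(key=lambda t: t[1] * nfiles + order[t[0]])
--     return [h for _, _, h in kept[:limit]]
-- ===== Notes on version B (the rewrite author's own statement) =====
-- stated objective: alternative
-- what changed: B eliminates A's round-robin while-loop over the buckets entirely: one pass assigns each kept hit the scalar schedule index copy_rank * num_files + file_rank, and a single sort by that index (plus a slice) reproduces the interleaved order.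
import Mathlib
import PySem

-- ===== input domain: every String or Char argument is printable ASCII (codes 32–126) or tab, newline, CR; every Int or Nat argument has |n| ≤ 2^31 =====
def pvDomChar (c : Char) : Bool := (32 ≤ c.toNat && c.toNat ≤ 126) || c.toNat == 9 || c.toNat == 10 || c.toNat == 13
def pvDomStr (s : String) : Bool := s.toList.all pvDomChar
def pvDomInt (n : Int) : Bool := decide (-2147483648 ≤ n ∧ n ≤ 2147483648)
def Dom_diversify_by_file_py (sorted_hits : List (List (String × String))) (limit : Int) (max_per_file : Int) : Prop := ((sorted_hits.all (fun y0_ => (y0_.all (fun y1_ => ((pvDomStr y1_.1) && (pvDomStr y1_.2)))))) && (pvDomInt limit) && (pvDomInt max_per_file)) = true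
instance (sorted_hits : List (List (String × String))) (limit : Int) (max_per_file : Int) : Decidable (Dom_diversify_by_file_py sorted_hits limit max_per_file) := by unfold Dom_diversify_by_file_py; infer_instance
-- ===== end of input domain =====

-- B replaces A's round-robin while-loop by a schedule-index sort: each kept hit gets
-- the scalar key copy_rank * num_files + file_rank and a single sort yields the same
-- order (objective: alternative algorithm; exact same return value).

-- ===== PORT A =====
-- fp = h.get("file_path") or ""   (shared source line of both Pythons; '' is the only falsy str)
def pvFP (h : List (String × String)) : String :=
  match (PySem.Dict.mk h).get? "file_path" with
  | some s => if s = "" then "" else s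
  | none => ""

-- loop body of A's first loop: setdefault, then capped append
def pvBuildA (max_per_file : Int) (b : PySem.Dict String (List (List (String × String)))) (h : List (String × String)) : PySem.Dict String (List (List (String × String))) :=
  if (((b.setdefault (pvFP h) []).getD (pvFP h) []).length : Int) < max_per_file then
    (b.setdefault (pvFP h) []).insert (pvFP h) ((b.setdefault (pvFP h) []).getD (pvFP h) [] ++ [h])
  else b.setdefault (pvFP h) []

-- A's inner 'for fp, lst in buckets.items()' with the 'progressed' flag and the break at limit
def pvRoundA (limit : Int) (ri : Nat) : List (String × List (List (String × String))) → List (List (String × String)) → Bool → List (List (String × String)) × Bool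
  | [], out, prog => (out, prog)
  | (_, lst) :: rest, out, prog =>
    if ri < lst.length then
      if limit ≤ ((out ++ [lst.getD ri []]).length : Int) then (out ++ [lst.getD ri []], true)
      else pvRoundA limit ri rest (out ++ [lst.getD ri []]) true
    else pvRoundA limit ri rest out prog

-- A's 'while len(out) < limit' loop; fuel only bounds the recursion (the loop exits by
-- itself after at most maxBucketLen+1 rounds, so the fuel-0 branch is never reached
-- at the fuel value diversify_by_file_py supplies)
def pvLoopA (limit : Int) (items : List (String × List (List (String × String)))) : Nat → Nat → List (List (String × String)) → List (List (String × String))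
  | 0, _, out => out
  | fuel+1, ri, out =>
    if limit ≤ (out.length : Int) then out
    else
      if (pvRoundA limit ri items out false).2 then
        pvLoopA limit items fuel (ri+1) (pvRoundA limit ri items out false).1
      else (pvRoundA limit ri items out false).1

def diversify_by_file_py (sorted_hits : List (List (String × String))) (limit : Int) (max_per_file : Int) : List (List (String × String)) :=
  let buckets := sorted_hits.foldl (pvBuildA max_per_file) PySem.Dict.empty
  pvLoopA limit buckets.items ((buckets.items.map (fun p => p.2.length)).foldl max 0 + 2) 0 []

-- ===== PORT B =====
-- loop body of B's single pass: first-seen rank, occurrence count, decorated kept list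
def pvStepB (max_per_file : Int) (st : PySem.Dict String Nat × PySem.Dict String Nat × List (String × Nat × List (String × String))) (h : List (String × String)) : PySem.Dict String Nat × PySem.Dict String Nat × List (String × Nat × List (String × String)) :=
  let fp := pvFP h
  let order := if st.1.contains fp then st.1 else st.1.insert fp st.1.size
  let j := st.2.1.getD fp 0
  (order, st.2.1.insert fp (j + 1), if (j : Int) < max_per_file then st.2.2 ++ [(fp, j, h)] else st.2.2)

def diversify_by_file_py_alt (sorted_hits : List (List (String × String))) (limit : Int) (max_per_file : Int) : List (List (String × String)) :=
  let st := sorted_hits.foldl (pvStepB max_per_file) (PySem.Dict.empty, PySem.Dict.empty, [])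
  if limit ≤ 0 then []
  else ((PySem.List.sorted st.2.2 (fun t => t.2.1 * st.1.size + st.1.getD t.1 0)).take limit.toNat).map (fun t => t.2.2)

-- ===== PRECONDITION & SPEC =====
def Spec_diversify_by_file_py (sorted_hits : List (List (String × String))) (limit : Int) (max_per_file : Int) (out : List (List (String × String))) : Prop := out = diversify_by_file_py_alt sorted_hits limit max_per_file
instance (sorted_hits : List (List (String × String))) (limit : Int) (max_per_file : Int) (out : List (List (String × String))) : Decidable (Spec_diversify_by_file_py sorted_hits limit max_per_file out) := by unfold Spec_diversify_by_file_py; infer_instance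

-- ===== CLAIM (what is proved, stated in full; the proofs are below) =====
def Claim_equal_diversify_by_file_py : Prop := ∀ (sorted_hits : List (List (String × String))) (limit : Int) (max_per_file : Int), Dom_diversify_by_file_py sorted_hits limit max_per_file → Spec_diversify_by_file_py sorted_hits limit max_per_file (diversify_by_file_py sorted_hits limit max_per_file)

-- ===== LEMMAS AND PROOFS =====

-- reference model of the state both passes build:
-- the distinct file keys in first-seen order, and the capped per-file bucket
def pvKeysOf (xs : List (List (String × String))) : List String := PySem.Set.ofList (xs.map pvFP)

def pvBuck (cap : Int) (xs : List (List (String × String))) (k : String) : List (List (String × String)) :=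
  (xs.filter (fun h => pvFP h == k)).take cap.toNat

-- per-file enumeration of the kept hits (what B's kept list is a permutation of)
def pvE (cap : Int) (xs : List (List (String × String))) : List (String × Nat × List (String × String)) :=
  (pvKeysOf xs).flatMap (fun k => (pvBuck cap xs k).zipIdx.map (fun q => (k, q.2, q.1)))

-- per-round enumeration (the round-robin order)
def pvRow (cap : Int) (xs : List (List (String × String))) (j : Nat) : List (String × Nat × List (String × String)) :=
  ((pvKeysOf xs).filter (fun k => decide (j < (pvBuck cap xs k).length))).map
    (fun k => (k, j, (pvBuck cap xs k).getD j []))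

def pvT (cap : Int) (xs : List (List (String × String))) (R : Nat) : List (String × Nat × List (String × String)) :=
  (List.range R).flatMap (pvRow cap xs)

theorem pvKeys_append (ys : List (List (String × String))) (h : List (String × String)) :
    pvKeysOf (ys ++ [h]) = PySem.Set.add (pvKeysOf ys) (pvFP h) := by
  simp [pvKeysOf, PySem.Set.ofList_eq_foldl, List.foldl_append]

theorem pvKeys_nodup (xs : List (List (String × String))) : (pvKeysOf xs).Nodup :=
  PySem.Set.nodup_ofList _

theorem pvMem_keys (xs : List (List (String × String))) (k : String) :
    k ∈ pvKeysOf xs ↔ k ∈ xs.map pvFP := PySem.Set.mem_ofList _ _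

theorem pvKeys_append_mem (ys : List (List (String × String))) (h : List (String × String))
    (hmem : pvFP h ∈ pvKeysOf ys) : pvKeysOf (ys ++ [h]) = pvKeysOf ys := by
  rw [pvKeys_append, PySem.Set.add]
  simp [PySem.Set.contains, hmem]

theorem pvKeys_append_not_mem (ys : List (List (String × String))) (h : List (String × String))
    (hmem : pvFP h ∉ pvKeysOf ys) : pvKeysOf (ys ++ [h]) = pvKeysOf ys ++ [pvFP h] := by
  rw [pvKeys_append, PySem.Set.add]
  simp [PySem.Set.contains, hmem]

theorem pvBuck_append_ne (cap : Int) (ys : List (List (String × String))) (h : List (String × String))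
    (k : String) (hne : pvFP h ≠ k) : pvBuck cap (ys ++ [h]) k = pvBuck cap ys k := by
  simp [pvBuck, List.filter_append, hne]

theorem pvBuck_filter_len (ys : List (List (String × String))) (k : String) :
    (ys.filter (fun h => pvFP h == k)).length = (ys.map pvFP).count k := by
  rw [List.count_eq_countP, List.countP_map, ← List.countP_eq_length_filter]
  rfl

theorem pvBuck_append_lt (cap : Int) (ys : List (List (String × String))) (h : List (String × String))
    (hlt : (ys.filter (fun x => pvFP x == pvFP h)).length < cap.toNat) :
    pvBuck cap (ys ++ [h]) (pvFP h) = ys.filter (fun x => pvFP x == pvFP h) ++ [h] ∧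
      pvBuck cap ys (pvFP h) = ys.filter (fun x => pvFP x == pvFP h) := by
  constructor
  · simp only [pvBuck, List.filter_append, List.filter_cons, List.filter_nil, beq_self_eq_true,
      if_true]
    rw [List.take_append, List.take_of_length_le (by omega), List.take_of_length_le (by simp; omega)]
  · exact List.take_of_length_le (by omega)

theorem pvBuck_append_ge (cap : Int) (ys : List (List (String × String))) (h : List (String × String))
    (hge : cap.toNat ≤ (ys.filter (fun x => pvFP x == pvFP h)).length) :
    pvBuck cap (ys ++ [h]) (pvFP h) = pvBuck cap ys (pvFP h) := by
  simp only [pvBuck, List.filter_append, List.filter_cons, List.filter_nil, beq_self_eq_true,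
    if_true]
  rw [List.take_append, Nat.sub_eq_zero_of_le hge, List.take_zero, List.append_nil]

theorem pvBuck_len (cap : Int) (xs : List (List (String × String))) (k : String) :
    (pvBuck cap xs k).length = min cap.toNat ((xs.map pvFP).count k) := by
  simp [pvBuck, List.length_take, pvBuck_filter_len]

theorem pvBuck_fresh (ys : List (List (String × String))) (k : String)
    (hk : k ∉ ys.map pvFP) : ys.filter (fun x => pvFP x == k) = [] := by
  rw [List.filter_eq_nil_iff]
  intro a ha hb
  simp only [beq_iff_eq] at hb
  exact hk (hb ▸ List.mem_map_of_mem ha)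

-- ---------- characterization of A's grouping pass ----------
theorem pvStateA (cap : Int) (xs : List (List (String × String))) :
    (xs.foldl (pvBuildA cap) PySem.Dict.empty).items
      = (pvKeysOf xs).map (fun k => (k, pvBuck cap xs k)) := by
  induction xs using List.reverseRecOn with
  | nil => rfl
  | append_singleton ys h ih =>
    rw [List.foldl_append, List.foldl_cons, List.foldl_nil]
    set d := ys.foldl (pvBuildA cap) PySem.Dict.empty with hd
    have hkeys : d.keys = pvKeysOf ys := by
      show d.items.map Prod.fst = _
      rw [ih, List.map_map]
      exact List.map_id _
    have hnd : d.keys.Nodup := by rw [hkeys]; exact pvKeys_nodup ys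
    have hcontains : d.contains (pvFP h) = decide (pvFP h ∈ pvKeysOf ys) := by
      rw [PySem.Dict.contains_eq_decide_mem_keys, hkeys]
    by_cases hmem : pvFP h ∈ pvKeysOf ys
    · -- existing key
      have hc : d.contains (pvFP h) = true := by rw [hcontains]; simpa
      have hitem : (pvFP h, pvBuck cap ys (pvFP h)) ∈ d.items := by
        rw [ih]; exact List.mem_map_of_mem hmem
      have hgetD : d.getD (pvFP h) [] = pvBuck cap ys (pvFP h) :=
        PySem.Dict.getD_of_mem_items d hitem hnd []
      have hkeq := pvKeys_append_mem ys h hmem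
      unfold pvBuildA
      rw [PySem.Dict.setdefault_of_contains d _ hc, hgetD]
      by_cases hlen : ((pvBuck cap ys (pvFP h)).length : Int) < cap
      · rw [if_pos hlen, PySem.Dict.items_insert_of_contains d _ hc, ih, List.map_map, hkeq]
        have hflt : (ys.filter (fun x => pvFP x == pvFP h)).length < cap.toNat := by
          rw [pvBuck_len, pvBuck_filter_len] at *
          omega
        obtain ⟨h1, h2⟩ := pvBuck_append_lt cap ys h hflt
        apply List.map_congr_left
        intro k hk
        simp only [Function.comp]
        by_cases hke : k = pvFP h
        · subst hke
          simp only [beq_self_eq_true, if_true]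
          rw [h1, h2]
        · have hbe : (k == pvFP h) = false := by simpa using hke
          simp only [hbe, Bool.false_eq_true, if_false]
          rw [pvBuck_append_ne cap ys h k (fun e => hke e.symm)]
      · rw [if_neg hlen, ih, hkeq]
        have hge : cap.toNat ≤ (ys.filter (fun x => pvFP x == pvFP h)).length := by
          rw [pvBuck_len, pvBuck_filter_len] at *
          omega
        apply List.map_congr_left
        intro k hk
        by_cases hke : k = pvFP h
        · subst hke; rw [pvBuck_append_ge cap ys h hge]
        · rw [pvBuck_append_ne cap ys h k (fun e => hke e.symm)]
    · -- fresh key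
      have hc : d.contains (pvFP h) = false := by rw [hcontains]; simpa
      have hkeq := pvKeys_append_not_mem ys h hmem
      have hfresh : ys.filter (fun x => pvFP x == pvFP h) = [] :=
        pvBuck_fresh ys (pvFP h) (fun hx => hmem ((pvMem_keys ys (pvFP h)).mpr hx))
      have hbuckrest : ∀ k ∈ pvKeysOf ys, pvBuck cap (ys ++ [h]) k = pvBuck cap ys k := by
        intro k hk
        exact pvBuck_append_ne cap ys h k (fun e => hmem (e ▸ hk))
      have hbuckfp : pvBuck cap (ys ++ [h]) (pvFP h) = List.take cap.toNat [h] := by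
        simp only [pvBuck, List.filter_append, List.filter_cons, List.filter_nil,
          beq_self_eq_true, if_true, hfresh, List.nil_append]
      unfold pvBuildA
      rw [PySem.Dict.setdefault_of_not_contains d _ hc]
      rw [PySem.Dict.getD_insert_self]
      by_cases hcap : ((List.length ([] : List (List (String × String)))) : Int) < cap
      · rw [if_pos hcap, PySem.Dict.insert_insert_self, List.nil_append,
          PySem.Dict.items_insert_of_not_contains d _ hc, ih, hkeq, List.map_append]
        congr 1
        · exact (List.map_congr_left (fun k hk => by rw [hbuckrest k hk])).symm
        · simp only [List.map_cons, List.map_nil]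
          have h1 : pvBuck cap (ys ++ [h]) (pvFP h) = [h] := by
            rw [hbuckfp]
            have : 1 ≤ cap.toNat := by simp at hcap; omega
            exact List.take_of_length_le (by simpa)
          rw [h1]
      · rw [if_neg hcap, PySem.Dict.items_insert_of_not_contains d _ hc, ih, hkeq, List.map_append]
        congr 1
        · exact (List.map_congr_left (fun k hk => by rw [hbuckrest k hk])).symm
        · simp only [List.map_cons, List.map_nil]
          have h1 : pvBuck cap (ys ++ [h]) (pvFP h) = [] := by
            rw [hbuckfp]
            have : cap.toNat = 0 := by simp at hcap; omega
            rw [this, List.take_zero]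
          rw [h1]

-- permutation shape of one flatMap update: one chunk gains one trailing element
theorem pvFlatMap_perm_append {T : Type} (u v : List String) (a : String)
    (f g : String → List T) (x : T)
    (hu : ∀ k ∈ u, f k = g k) (hv : ∀ k ∈ v, f k = g k) (ha : f a = g a ++ [x]) :
    ((u ++ a :: v).flatMap f).Perm ((u ++ a :: v).flatMap g ++ [x]) := by
  rw [List.flatMap_append, List.flatMap_cons, List.flatMap_append, List.flatMap_cons,
    List.flatMap_congr hu, List.flatMap_congr hv, ha]
  simp only [List.append_assoc]
  exact List.Perm.append_left _ (List.Perm.append_left _ List.perm_append_comm)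

-- ---------- characterization of B's single pass ----------
theorem pvStateB (cap : Int) (xs : List (List (String × String))) :
    (xs.foldl (pvStepB cap) (PySem.Dict.empty, PySem.Dict.empty, [])).1.items = (pvKeysOf xs).zipIdx
    ∧ (∀ k, (xs.foldl (pvStepB cap) (PySem.Dict.empty, PySem.Dict.empty, [])).2.1.getD k 0 = (xs.map pvFP).count k)
    ∧ (xs.foldl (pvStepB cap) (PySem.Dict.empty, PySem.Dict.empty, [])).2.2.Perm (pvE cap xs) := by
  induction xs using List.reverseRecOn with
  | nil =>
    refine ⟨rfl, fun k => by simp, ?_⟩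
    simp [pvE, pvKeysOf, PySem.Set.ofList]
  | append_singleton ys h ih =>
    obtain ⟨ih1, ih2, ih3⟩ := ih
    rw [List.foldl_append, List.foldl_cons, List.foldl_nil]
    set st := ys.foldl (pvStepB cap) ((PySem.Dict.empty : PySem.Dict String Nat),
      (PySem.Dict.empty : PySem.Dict String Nat),
      ([] : List (String × Nat × List (String × String)))) with hst
    have hkeys : st.1.keys = pvKeysOf ys := by
      show st.1.items.map Prod.fst = _
      rw [ih1]; simp
    have hcontains : st.1.contains (pvFP h) = decide (pvFP h ∈ pvKeysOf ys) := by
      rw [PySem.Dict.contains_eq_decide_mem_keys, hkeys]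
    have hcount : st.2.1.getD (pvFP h) 0 = (ys.map pvFP).count (pvFP h) := ih2 _
    refine ⟨?_, ?_, ?_⟩
    · -- order dict
      show (if st.1.contains (pvFP h) then st.1 else st.1.insert (pvFP h) st.1.size).items = _
      by_cases hmem : pvFP h ∈ pvKeysOf ys
      · rw [if_pos (by rw [hcontains]; simpa), pvKeys_append_mem ys h hmem, ih1]
      · rw [if_neg (by rw [hcontains]; simpa),
          PySem.Dict.items_insert_of_not_contains _ _ (by rw [hcontains]; simpa),
          ih1, pvKeys_append_not_mem ys h hmem, List.zipIdx_append]
        have hsize : st.1.size = (pvKeysOf ys).length := by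
          show st.1.items.length = _
          rw [ih1, List.length_zipIdx]
        simp [hsize]
    · -- seen dict
      intro k
      show (st.2.1.insert (pvFP h) (st.2.1.getD (pvFP h) 0 + 1)).getD k 0 = _
      rw [PySem.Dict.getD_insert]
      by_cases hk : k = pvFP h
      · subst hk
        simp [hcount, List.count_append]
      · rw [if_neg hk, ih2 k, List.map_append, List.count_append]
        have h0 : List.count k (List.map pvFP [h]) = 0 := by
          simp only [List.map_cons, List.map_nil, List.count_eq_zero, List.mem_singleton]
          exact hk
        omega
    · -- kept list, up to permutation
      show (if ((st.2.1.getD (pvFP h) 0 : Nat) : Int) < cap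
            then st.2.2 ++ [(pvFP h, st.2.1.getD (pvFP h) 0, h)] else st.2.2).Perm (pvE cap (ys ++ [h]))
      rw [hcount]
      set j := (ys.map pvFP).count (pvFP h) with hj
      have hflen : (ys.filter (fun x => pvFP x == pvFP h)).length = j := pvBuck_filter_len ys (pvFP h)
      by_cases hmem : pvFP h ∈ pvKeysOf ys
      · have hkeq := pvKeys_append_mem ys h hmem
        by_cases hlt : ((j : Nat) : Int) < cap
        · rw [if_pos hlt]
          have hflt : (ys.filter (fun x => pvFP x == pvFP h)).length < cap.toNat := by omega
          obtain ⟨h1, h2⟩ := pvBuck_append_lt cap ys h hflt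
          obtain ⟨u, v, huv⟩ := List.append_of_mem hmem
          have hnd := pvKeys_nodup ys
          rw [huv] at hnd
          have hnotu : pvFP h ∉ u := by
            rw [List.nodup_append] at hnd
            exact fun hu => hnd.2.2 _ hu _ List.mem_cons_self rfl
          have hnotv : pvFP h ∉ v := by
            rw [List.nodup_append, List.nodup_cons] at hnd
            exact hnd.2.1.1
          have hperm : (pvE cap (ys ++ [h])).Perm (pvE cap ys ++ [(pvFP h, j, h)]) := by
            unfold pvE
            rw [hkeq, huv]
            apply pvFlatMap_perm_append
            · intro k hk
              rw [pvBuck_append_ne cap ys h k (fun e => hnotu (e ▸ hk))]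
            · intro k hk
              rw [pvBuck_append_ne cap ys h k (fun e => hnotv (e ▸ hk))]
            · rw [h1, h2, List.zipIdx_append]
              simp [hflen]
          exact (List.Perm.append ih3 (List.Perm.refl _)).trans hperm.symm
        · rw [if_neg hlt]
          have hge : cap.toNat ≤ (ys.filter (fun x => pvFP x == pvFP h)).length := by omega
          have hEeq : pvE cap (ys ++ [h]) = pvE cap ys := by
            unfold pvE
            rw [hkeq]
            apply List.flatMap_congr
            intro k hk
            by_cases hke : k = pvFP h
            · subst hke; rw [pvBuck_append_ge cap ys h hge]
            · rw [pvBuck_append_ne cap ys h k (fun e => hke e.symm)]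
          rw [hEeq]; exact ih3
      · have hkeq := pvKeys_append_not_mem ys h hmem
        have hj0 : j = 0 := by
          rw [hj, List.count_eq_zero_of_not_mem]
          exact fun hx => hmem ((pvMem_keys ys (pvFP h)).mpr hx)
        have hfresh : ys.filter (fun x => pvFP x == pvFP h) = [] :=
          pvBuck_fresh ys (pvFP h) (fun hx => hmem ((pvMem_keys ys (pvFP h)).mpr hx))
        have hbuckfp : pvBuck cap (ys ++ [h]) (pvFP h) = List.take cap.toNat [h] := by
          simp only [pvBuck, List.filter_append, List.filter_cons, List.filter_nil,
            beq_self_eq_true, if_true, hfresh, List.nil_append]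
        have hchunkrest : pvE cap (ys ++ [h])
            = pvE cap ys ++ (pvBuck cap (ys ++ [h]) (pvFP h)).zipIdx.map (fun q => (pvFP h, q.2, q.1)) := by
          unfold pvE
          rw [hkeq, List.flatMap_append, List.flatMap_cons, List.flatMap_nil, List.append_nil]
          congr 1
          apply List.flatMap_congr
          intro k hk
          rw [pvBuck_append_ne cap ys h k (fun e => hmem (e ▸ hk))]
        by_cases hlt : ((j : Nat) : Int) < cap
        · rw [if_pos hlt]
          have hone : 1 ≤ cap.toNat := by omega
          have : pvBuck cap (ys ++ [h]) (pvFP h) = [h] := by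
            rw [hbuckfp]; exact List.take_of_length_le (by simpa)
          rw [hchunkrest, this, hj0]
          exact List.Perm.append ih3 (by simp [List.zipIdx])
        · rw [if_neg hlt]
          have hzero : cap.toNat = 0 := by omega
          have : pvBuck cap (ys ++ [h]) (pvFP h) = [] := by
            rw [hbuckfp, hzero, List.take_zero]
          rw [hchunkrest, this]
          simpa using ih3

-- ---------- characterization of A's emission loop ----------
-- the active buckets at round ri, and what one round appends
def pvActive (ri : Nat) (items : List (String × List (List (String × String)))) : List (List (List (String × String))) :=
  (items.map Prod.snd).filter (fun l => decide (ri < l.length))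

def pvTake (limit : Int) (ri : Nat) : List (List (List (String × String))) → List (List (String × String)) → List (List (String × String))
  | [], out => out
  | lst :: rest, out => if limit ≤ (out.length : Int) then out else pvTake limit ri rest (out ++ [lst.getD ri []])

theorem pvRoundA_snd_true (limit : Int) (ri : Nat) (items : List (String × List (List (String × String)))) :
    ∀ out, (pvRoundA limit ri items out true).2 = true := by
  induction items with
  | nil => intro out; rfl
  | cons p rest ih =>
    intro out
    obtain ⟨k, lst⟩ := p
    simp only [pvRoundA]
    split_ifs with h1 h2 <;> simp [ih]

theorem pvRoundA_fst (limit : Int) (ri : Nat) (items : List (String × List (List (String × String)))) :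
    ∀ out prog, ¬ limit ≤ (out.length : Int) →
    (pvRoundA limit ri items out prog).1 = pvTake limit ri (pvActive ri items) out := by
  induction items with
  | nil => intro out prog _; rfl
  | cons p rest ih =>
    intro out prog hout
    obtain ⟨k, lst⟩ := p
    simp only [pvRoundA, pvActive, List.map_cons, List.filter_cons]
    by_cases h1 : ri < lst.length
    · simp only [h1, decide_true, if_true]
      conv_rhs => rw [pvTake]
      rw [if_neg hout]
      by_cases h2 : limit ≤ (((out ++ [lst.getD ri []]).length : Nat) : Int)
      · rw [if_pos h2]
        have : ∀ l out', limit ≤ ((out' : List (List (String × String))).length : Int) → pvTake limit ri l out' = out' := by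
          intro l
          cases l <;> intro out' h' <;> simp [pvTake, h']
        exact (this _ _ h2).symm
      · rw [if_neg h2]
        exact ih _ _ h2
    · simp only [h1, decide_false, Bool.false_eq_true, if_false]
      exact ih _ _ hout

theorem pvRoundA_prog (limit : Int) (ri : Nat) (items : List (String × List (List (String × String)))) :
    ∀ out, ¬ limit ≤ (out.length : Int) →
    (pvRoundA limit ri items out false).2 = !(pvActive ri items).isEmpty := by
  induction items with
  | nil => intro out _; rfl
  | cons p rest ih =>
    intro out hout
    obtain ⟨k, lst⟩ := p
    simp only [pvRoundA, pvActive, List.map_cons, List.filter_cons]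
    by_cases h1 : ri < lst.length
    · simp only [h1, decide_true, if_true, List.isEmpty_cons, Bool.not_false]
      by_cases h2 : limit ≤ (((out ++ [lst.getD ri []]).length : Nat) : Int)
      · rw [if_pos h2]
      · rw [if_neg h2]
        exact pvRoundA_snd_true limit ri rest _
    · simp only [h1, decide_false, Bool.false_eq_true, if_false]
      exact ih out hout

theorem pvTake_eq (limit : Int) (ri : Nat) (l : List (List (List (String × String)))) :
    ∀ out, pvTake limit ri l out
      = out ++ (l.map (fun x => x.getD ri [])).take ((limit - out.length).toNat) := by
  induction l with
  | nil => intro out; simp [pvTake]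
  | cons x rest ih =>
    intro out
    rw [pvTake]
    by_cases hout : limit ≤ (out.length : Int)
    · rw [if_pos hout]
      have h0 : (limit - out.length).toNat = 0 := by omega
      simp [h0]
    · rw [if_neg hout, ih]
      have hk : (limit - out.length).toNat = (limit - ((out.length : Int) + 1)).toNat + 1 := by omega
      have hlen : ((out ++ [x.getD ri []]).length : Int) = (out.length : Int) + 1 := by
        simp
      rw [hlen, List.map_cons, hk, List.take_succ_cons, List.append_assoc, List.singleton_append]

-- the hits A's while-loop still has to emit from round ri on, with fuel
def pvFull (items : List (String × List (List (String × String)))) : Nat → Nat → List (List (String × String))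
  | 0, _ => []
  | fuel+1, ri =>
    if (pvActive ri items).isEmpty then []
    else (pvActive ri items).map (fun l => l.getD ri []) ++ pvFull items fuel (ri+1)

theorem pvLoopA_eq (limit : Int) (items : List (String × List (List (String × String)))) :
    ∀ fuel ri out, pvLoopA limit items fuel ri out
      = out ++ (pvFull items fuel ri).take ((limit - out.length).toNat) := by
  intro fuel
  induction fuel with
  | zero => intro ri out; simp [pvLoopA, pvFull]
  | succ f ih =>
    intro ri out
    by_cases hout : limit ≤ (out.length : Int)
    · have h0 : (limit - out.length).toNat = 0 := by omega
      simp [pvLoopA, hout, h0]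
    · have hfst := pvRoundA_fst limit ri items out false hout
      have hprog := pvRoundA_prog limit ri items out hout
      by_cases hemp : (pvActive ri items).isEmpty
      · have h2 : (pvRoundA limit ri items out false).2 = false := by
          rw [hprog, hemp]; rfl
        have h1 : (pvRoundA limit ri items out false).1 = out := by
          rw [hfst, pvTake_eq, List.isEmpty_iff.mp hemp]
          simp
        simp [pvLoopA, pvFull, hout, h2, h1, hemp]
      · have hef : (pvActive ri items).isEmpty = false := by
          simpa using hemp
        have h2 : (pvRoundA limit ri items out false).2 = true := by
          rw [hprog, hef]; rfl
        set row := (pvActive ri items).map (fun l => l.getD ri []) with hrowdef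
        have h1 : (pvRoundA limit ri items out false).1
            = out ++ row.take ((limit - out.length).toNat) := by
          rw [hfst, pvTake_eq]
        have hL : pvLoopA limit items (f+1) ri out
            = pvLoopA limit items f (ri+1) ((pvRoundA limit ri items out false).1) := by
          simp [pvLoopA, hout, h2]
        rw [hL, h1, ih]
        have hF : pvFull items (f+1) ri = row ++ pvFull items f (ri+1) := by
          simp [pvFull, hef, hrowdef]
        rw [hF, List.take_append, List.append_assoc]
        congr 2
        have hlen : ((out ++ row.take ((limit - out.length).toNat)).length : Int)
            = (out.length : Int) + min ((limit - out.length).toNat) row.length := by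
          simp [List.length_take]
        rw [hlen]
        congr 1
        omega

theorem pvActive_mono (items : List (String × List (List (String × String)))) (ri : Nat)
    (h : (pvActive ri items).isEmpty = true) : (pvActive (ri+1) items).isEmpty = true := by
  rw [List.isEmpty_iff] at h ⊢
  unfold pvActive at h ⊢
  rw [List.filter_eq_nil_iff] at h ⊢
  intro l hl
  have := h l hl
  simp at this ⊢
  omega

theorem pvFull_nil (items : List (String × List (List (String × String)))) :
    ∀ fuel ri, (pvActive ri items).isEmpty = true → pvFull items fuel ri = [] := by
  intro fuel
  induction fuel with
  | zero => intro ri _; rfl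
  | succ f _ => intro ri h; simp [pvFull, h]

theorem pvFull_eq_flatMap (items : List (String × List (List (String × String)))) :
    ∀ fuel ri, pvFull items fuel ri
      = (List.range' ri fuel).flatMap (fun j => (pvActive j items).map (fun l => l.getD j [])) := by
  intro fuel
  induction fuel with
  | zero => intro ri; rfl
  | succ f ih =>
    intro ri
    rw [List.range'_succ, List.flatMap_cons, ← ih (ri+1)]
    by_cases h : (pvActive ri items).isEmpty
    · rw [pvFull_nil items (f+1) ri h, List.isEmpty_iff.mp h,
        pvFull_nil items f (ri+1) (pvActive_mono items ri h)]
      simp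
    · simp [pvFull, h]

-- ---------- the transpose permutation ----------
theorem pvChunk_take (k : String) (l : List (List (String × String))) :
    ∀ R, (List.range R).flatMap
        (fun j => if j < l.length then [(k, j, l.getD j ([] : List (String × String)))] else [])
      = (l.take R).zipIdx.map (fun q => (k, q.2, q.1)) := by
  intro R
  induction R with
  | zero => simp
  | succ n ih =>
    rw [List.range_succ, List.flatMap_append, ih, List.flatMap_cons, List.flatMap_nil,
      List.append_nil, List.take_add_one, List.zipIdx_append, List.map_append]
    by_cases h : n < l.length
    · have hget : l[n]? = some l[n] := List.getElem?_eq_getElem h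
      have hlen : (l.take n).length = n := by simp [List.length_take]; omega
      rw [if_pos h, hget, List.getD_eq_getElem l [] h]
      simp [List.zipIdx, hlen]
    · have hget : l[n]? = none := List.getElem?_eq_none (by omega)
      rw [if_neg h, hget]
      simp

theorem pvChunk_eq (k : String) (l : List (List (String × String))) (R : Nat) (hR : l.length ≤ R) :
    (List.range R).flatMap
        (fun j => if j < l.length then [(k, j, l.getD j ([] : List (String × String)))] else [])
      = l.zipIdx.map (fun q => (k, q.2, q.1)) := by
  rw [pvChunk_take, List.take_of_length_le hR]

theorem pvSplit_perm {α : Type} (js : List Nat) (f g : Nat → List α) :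
    (js.flatMap (fun j => f j ++ g j)).Perm (js.flatMap f ++ js.flatMap g) := by
  induction js with
  | nil => simp
  | cons a l ih =>
    simp only [List.flatMap_cons]
    refine (List.Perm.append_left (f a ++ g a) ih).trans ?_
    rw [List.append_assoc, List.append_assoc]
    apply List.Perm.append_left (f a)
    rw [← List.append_assoc, ← List.append_assoc]
    exact List.Perm.append_right _ List.perm_append_comm

theorem pvTransposeGen (B : String → List (List (String × String))) (R : Nat) :
    ∀ ks : List String, (∀ k ∈ ks, (B k).length ≤ R) →
    (ks.flatMap (fun k => (B k).zipIdx.map (fun q => (k, q.2, q.1)))).Perm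
      ((List.range R).flatMap (fun j =>
        (ks.filter (fun k => decide (j < (B k).length))).map
          (fun k => (k, j, (B k).getD j ([] : List (String × String)))))) := by
  intro ks
  induction ks with
  | nil => intro _; simp
  | cons k ks ih =>
    intro hR
    rw [List.flatMap_cons]
    have hsplit : ∀ j, ((k :: ks).filter (fun k' => decide (j < (B k').length))).map
          (fun k' => (k', j, (B k').getD j ([] : List (String × String))))
        = (if j < (B k).length then [(k, j, (B k).getD j [])] else [])
          ++ (ks.filter (fun k' => decide (j < (B k').length))).map
              (fun k' => (k', j, (B k').getD j [])) := by
      intro j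
      rw [List.filter_cons]
      by_cases hc : j < (B k).length <;> simp [hc]
    rw [List.flatMap_congr (fun j _ => hsplit j)]
    refine List.Perm.trans ?_ (pvSplit_perm (List.range R) _ _).symm
    rw [pvChunk_eq k (B k) R (hR k List.mem_cons_self)]
    exact List.Perm.append_left _ (ih (fun k' hk' => hR k' (List.mem_cons_of_mem _ hk')))

-- ---------- pairwise order of the round-robin enumeration ----------
theorem pvPairwiseRange {α : Type} (R : Nat) (f : Nat → List α) (K : α → Nat)
    (h1 : ∀ j, (f j).Pairwise (fun a b => K a < K b))
    (h2 : ∀ j j', j < j' → ∀ a ∈ f j, ∀ b ∈ f j', K a < K b) :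
    ((List.range R).flatMap f).Pairwise (fun a b => K a < K b) := by
  induction R with
  | zero => simp
  | succ n ih =>
    rw [List.range_succ, List.flatMap_append, List.flatMap_cons, List.flatMap_nil,
      List.append_nil, List.pairwise_append]
    refine ⟨ih, h1 n, ?_⟩
    intro a ha b hb
    rw [List.mem_flatMap] at ha
    obtain ⟨j, hj, haj⟩ := ha
    exact h2 j n (List.mem_range.mp hj) a haj b hb

-- ===== VERDICT (by name: the statement is the Claim_ definition above) =====
theorem diversify_by_file_py_spec : Claim_equal_diversify_by_file_py := by
  intro xs limit cap _
  unfold Spec_diversify_by_file_py diversify_by_file_py diversify_by_file_py_alt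
  obtain ⟨hB1, hB2, hB3⟩ := pvStateB cap xs
  have hA := pvStateA cap xs
  set d := xs.foldl (pvBuildA cap) PySem.Dict.empty with hd
  set st := xs.foldl (pvStepB cap) ((PySem.Dict.empty : PySem.Dict String Nat),
    (PySem.Dict.empty : PySem.Dict String Nat),
    ([] : List (String × Nat × List (String × String)))) with hst
  set R := (d.items.map (fun p => p.2.length)).foldl max 0 + 2 with hRdef
  -- bound on every bucket length
  have hbound : ∀ k ∈ pvKeysOf xs, (pvBuck cap xs k).length ≤ R := by
    intro k hk
    have hmem : (k, pvBuck cap xs k) ∈ d.items := by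
      rw [hA]; exact List.mem_map_of_mem hk
    have hfold : (d.items.map (fun p => p.2.length)).foldl max 0
        = d.items.foldl (fun acc y => max acc (y.2.length)) 0 := by rw [List.foldl_map]
    have hle := (PySem.List.le_foldl_max_nat d.items (fun p => p.2.length) 0).2 _ hmem
    dsimp only at hle
    rw [hRdef, hfold]
    omega
  -- A's output: the round-robin enumeration, truncated at limit
  have hAout : pvLoopA limit d.items R 0 []
      = ((List.range R).flatMap (fun j => (pvActive j d.items).map (fun l => l.getD j []))).take
          limit.toNat := by
    rw [pvLoopA_eq, pvFull_eq_flatMap, ← List.range_eq_range']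
    simp
  rw [hAout]
  by_cases hlim : limit ≤ 0
  · rw [if_pos hlim]
    have : limit.toNat = 0 := by omega
    simp [this]
  · rw [if_neg hlim]
    -- B's sort produces exactly the round-robin enumeration pvT
    have hsize : st.1.size = (pvKeysOf xs).length := by
      show st.1.items.length = _
      rw [hB1, List.length_zipIdx]
    have hndk : st.1.keys.Nodup := by
      show (st.1.items.map Prod.fst).Nodup
      rw [hB1]
      simpa using pvKeys_nodup xs
    have hOrd : ∀ p ∈ (pvKeysOf xs).zipIdx, st.1.getD p.1 0 = p.2 := by
      intro p hp
      exact PySem.Dict.getD_of_mem_items st.1 (by rw [hB1]; exact hp) hndk 0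
    set F := (pvKeysOf xs).length with hF
    set K : String × Nat × List (String × String) → Nat :=
      fun t => t.2.1 * st.1.size + st.1.getD t.1 0 with hK
    have hOrdLt : (pvKeysOf xs).Pairwise (fun a b => st.1.getD a 0 < st.1.getD b 0) := by
      have hsnd : (pvKeysOf xs).zipIdx.map Prod.snd = List.range F := by
        rw [hF]
        simp [List.range_eq_range']
      have h0 : ((pvKeysOf xs).zipIdx.map Prod.snd).Pairwise (· < ·) := by
        rw [hsnd]; exact List.pairwise_lt_range
      have h1 : (pvKeysOf xs).zipIdx.Pairwise (fun p q => p.2 < q.2) := List.pairwise_map.mp h0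
      have h2 : (pvKeysOf xs).zipIdx.Pairwise
          (fun p q => st.1.getD p.1 0 < st.1.getD q.1 0) := by
        refine List.Pairwise.imp_of_mem ?_ h1
        intro a b ha hb hlt
        rw [hOrd a ha, hOrd b hb]; exact hlt
      have h3 : ((pvKeysOf xs).zipIdx.map Prod.fst).Pairwise
          (fun a b => st.1.getD a 0 < st.1.getD b 0) := List.pairwise_map.mpr h2
      simpa using h3
    have hOrdBound : ∀ k ∈ pvKeysOf xs, st.1.getD k 0 < F := by
      intro k hk
      obtain ⟨i, hlt, hget⟩ := List.mem_iff_getElem.mp hk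
      have hmemz : (k, i) ∈ (pvKeysOf xs).zipIdx := by
        rw [List.mem_zipIdx_iff_getElem?]
        simp [List.getElem?_eq_getElem hlt, hget]
      have hval := hOrd (k, i) hmemz
      simp only at hval
      rw [hval, hF]
      exact hlt
    have hpair : (pvT cap xs R).Pairwise (fun a b => K a < K b) := by
      unfold pvT
      apply pvPairwiseRange
      · intro j
        unfold pvRow
        rw [List.pairwise_map]
        refine List.Pairwise.imp_of_mem ?_ (List.Pairwise.filter _ hOrdLt)
        intro a b _ _ hlt
        simp only [hK]
        omega
      · intro j j' hjj a ha b hb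
        unfold pvRow at ha hb
        obtain ⟨ka, hka, rfl⟩ := List.mem_map.mp ha
        obtain ⟨kb, hkb, rfl⟩ := List.mem_map.mp hb
        have hba := hOrdBound ka (List.mem_of_mem_filter hka)
        simp only [hK, hsize]
        have h1 : j * F + st.1.getD ka 0 < (j + 1) * F := by
          rw [Nat.succ_mul]; omega
        have h2 : (j + 1) * F ≤ j' * F := Nat.mul_le_mul_right F (by omega)
        have h3 : j' * F ≤ j' * F + st.1.getD kb 0 := Nat.le_add_right _ _
        omega
    have hperm : (pvT cap xs R).Perm st.2.2 := by
      refine List.Perm.trans ?_ hB3.symm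
      exact (pvTransposeGen (pvBuck cap xs) R (pvKeysOf xs) hbound).symm
    have hsorted : PySem.List.sorted st.2.2 K = pvT cap xs R :=
      PySem.List.sorted_eq_of_perm_of_pairwise_lt st.2.2 (pvT cap xs R) K hperm hpair
    rw [hsorted]
    -- strip the decoration and commute the truncation
    have hstrip : (pvT cap xs R).map (fun t => t.2.2)
        = (List.range R).flatMap (fun j => (pvActive j d.items).map (fun l => l.getD j [])) := by
      unfold pvT
      rw [List.map_flatMap]
      apply List.flatMap_congr
      intro j _
      unfold pvRow pvActive
      rw [hA, List.map_map, List.map_map, List.filter_map, List.map_map]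
      rfl
    rw [List.map_take, hstrip]
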